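-- pv_equiv track=rewrite | github.com/Chanceinthebuilding/ops-payroll | app.py | _clean_permission_rows
-- ===== SOURCE A (Python) =====
-- PERMISSION_SCOPE_KEYS = ("payroll", "dashboard", "overtime", "commercialization", "admin_data")
--
-- PERMISSION_LEVELS = ("none", "view", "edit")
--
-- def _normalize_permission_level(raw, default: str = "none") -> str:
--     v = str(raw or "").strip().lower()
--     if v in PERMISSION_LEVELS:
--         return v
--     return default
--
-- def _clean_permission_rows(rows) -> list[dict]:
--     cleaned: list[dict] = []
--     seen: set[str] = set()
--     if not isinstance(rows, list):
--         return cleaned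
--     for row in rows:
--         if not isinstance(row, dict):
--             continue
--         email = str(row.get("email") or "").strip().lower()
--         if not email or "@" not in email:
--             continue
--         if email in seen:
--             continue
--         out = {"email": email}
--         for scope in PERMISSION_SCOPE_KEYS:
--             out[scope] = _normalize_permission_level(row.get(scope), "none")
--         cleaned.append(out)
--         seen.add(email)
--     cleaned.sort(key=lambda x: x["email"])
--     return cleaned
-- ===== SOURCE B (Python) =====
-- PERMISSION_SCOPE_KEYS = ("payroll", "dashboard", "overtime", "commercialization", "admin_data")
--
-- PERMISSION_LEVELS = ("none", "view", "edit")
--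
-- def _normalize_permission_level(raw, default: str = "none") -> str:
--     v = str(raw or "").strip().lower()
--     if v in PERMISSION_LEVELS:
--         return v
--     return default
--
-- def _clean_permission_rows(rows) -> list:
--     if not isinstance(rows, list):
--         return []
--     # Pass 1: normalize every valid row, WITHOUT deduplicating.
--     candidates = []
--     for row in rows:
--         if not isinstance(row, dict):
--             continue
--         email = str(row.get("email") or "").strip().lower()
--         if not email or "@" not in email:
--             continue
--         out = {"email": email}
--         for scope in PERMISSION_SCOPE_KEYS:
--             out[scope] = _normalize_permission_level(row.get(scope), "none")
--         candidates.append(out)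
--     # Stable sort by email: among duplicates the first-seen row leads its run.
--     candidates.sort(key=lambda x: x["email"])
--     # Pass 2: adjacency dedup — keep the first row of each equal-email run.
--     result = []
--     for cand in candidates:
--         if not result or result[-1]["email"] != cand["email"]:
--             result.append(cand)
--     return result
-- ===== Notes on version B (the rewrite author's own statement) =====
-- stated objective: alternative
-- what changed: A dedups during the scan with a seen-set and then sorts the deduplicated rows; B collects all valid normalized rows without deduplicating, stable-sorts them by email, and collapses adjacent equal-email runs in one extra pass (stability guarantees the first-seen row leads each run).
import Mathlib
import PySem

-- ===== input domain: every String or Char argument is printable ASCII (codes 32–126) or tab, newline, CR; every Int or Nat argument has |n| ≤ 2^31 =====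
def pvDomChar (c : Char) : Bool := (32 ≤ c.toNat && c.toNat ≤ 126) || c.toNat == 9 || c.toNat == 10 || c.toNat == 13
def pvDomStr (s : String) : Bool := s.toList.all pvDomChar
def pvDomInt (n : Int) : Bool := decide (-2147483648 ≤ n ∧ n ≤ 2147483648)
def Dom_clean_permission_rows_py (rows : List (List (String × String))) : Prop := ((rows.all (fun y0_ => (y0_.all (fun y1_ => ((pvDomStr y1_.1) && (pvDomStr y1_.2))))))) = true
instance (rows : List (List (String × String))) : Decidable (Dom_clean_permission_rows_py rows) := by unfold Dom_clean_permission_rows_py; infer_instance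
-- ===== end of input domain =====

-- B re-implements the dedup: instead of a `seen` set during the pass followed by a sort,
-- it collects ALL valid rows, stable-sorts them by email, and collapses adjacent equal-email
-- runs (stability makes the first-seen row lead each run).  Objective: alternative; same value.
-- Shared module helpers (identical lines in both Pythons):

-- _normalize_permission_level(raw, "none"); raw = row.get(scope) : Option String; str(raw or "") = raw.getD ""
def pvNormLevel (raw : Option String) : String :=
  let v := PySem.Str.lower (PySem.Str.strip (raw.getD ""))
  if v ∈ ["none", "view", "edit"] then v else "none"

-- str(row.get("email") or "").strip().lower()
def pvEmailOf (row : List (String × String)) : String :=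
  PySem.Str.lower (PySem.Str.strip (((PySem.Dict.mk row).get? "email").getD ""))

def pvScopes : List String := ["payroll", "dashboard", "overtime", "commercialization", "admin_data"]

-- out = {"email": email}; for scope in PERMISSION_SCOPE_KEYS: out[scope] = _normalize_permission_level(row.get(scope))
def pvMkOut (email : String) (row : List (String × String)) : List (String × String) :=
  (pvScopes.foldl (fun d s => d.insert s (pvNormLevel ((PySem.Dict.mk row).get? s)))
    (PySem.Dict.mk [("email", email)])).items

-- x["email"] (always present on rows built by pvMkOut)
def pvKey (x : List (String × String)) : String := PySem.Dict.getD (PySem.Dict.mk x) "email" ""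

-- ===== PORT A =====
def clean_permission_rows_py (rows : List (List (String × String))) : List (List (String × String)) :=
  PySem.List.sorted
    (rows.foldl
      (fun (st : List (List (String × String)) × PySem.Set String) row =>
        let email := pvEmailOf row
        if email = "" ∨ PySem.Str.isIn "@" email = false then st
        else if st.2.contains email then st
        else (st.1 ++ [pvMkOut email row], st.2.add email))
      ([], PySem.Set.ofList [])).1
    pvKey false

-- ===== PORT B =====
def clean_permission_rows_py_alt (rows : List (List (String × String))) : List (List (String × String)) :=
  (PySem.List.sorted
    (rows.foldl
      (fun acc row =>
        let email := pvEmailOf row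
        if email = "" ∨ PySem.Str.isIn "@" email = false then acc
        else acc ++ [pvMkOut email row]) [])
    pvKey false).foldl
    (fun res c =>
      match res.getLast? with
      | none => res ++ [c]
      | some p => if pvKey p ≠ pvKey c then res ++ [c] else res) []

-- ===== PRECONDITION & SPEC =====
def Spec_clean_permission_rows_py (rows : List (List (String × String))) (out : List (List (String × String))) : Prop := out = clean_permission_rows_py_alt rows
instance (rows : List (List (String × String))) (out : List (List (String × String))) : Decidable (Spec_clean_permission_rows_py rows out) := by unfold Spec_clean_permission_rows_py; infer_instance

-- ===== CLAIM (what is proved, stated in full; the proofs are below) =====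
def Claim_equal_clean_permission_rows_py : Prop := ∀ (rows : List (List (String × String))), Dom_clean_permission_rows_py rows → Spec_clean_permission_rows_py rows (clean_permission_rows_py rows)

-- ===== LEMMAS AND PROOFS =====

-- the candidate stream: every valid row, normalized, no dedup
def pvCands : List (List (String × String)) → List (List (String × String))
  | [] => []
  | row :: rs =>
      let email := pvEmailOf row
      if email = "" ∨ PySem.Str.isIn "@" email = false then pvCands rs
      else pvMkOut email row :: pvCands rs

-- first-occurrence dedup by email, as A's seen-set performs it
def pvDedupF (seen : PySem.Set String) : List (List (String × String)) → List (List (String × String))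
  | [] => []
  | c :: cs => if seen.contains (pvKey c) then pvDedupF seen cs
               else c :: pvDedupF (seen.add (pvKey c)) cs

-- adjacency dedup (structural form of B's second pass)
def pvAdjRun (k : String) : List (List (String × String)) → List (List (String × String))
  | [] => []
  | c :: cs => if pvKey c = k then pvAdjRun k cs else c :: pvAdjRun (pvKey c) cs

def pvAdjRec : List (List (String × String)) → List (List (String × String))
  | [] => []
  | c :: cs => c :: pvAdjRun (pvKey c) cs

def pvBlt (a b : List (String × String)) : Bool := decide (pvKey a < pvKey b)

theorem pvKey_mkOut (e : String) (row : List (String × String)) : pvKey (pvMkOut e row) = e := by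
  simp [pvMkOut, pvScopes, pvKey, PySem.Dict.insert, PySem.Dict.contains, PySem.Dict.getD,
    PySem.Dict.get?, List.foldl]

-- B's candidate fold
theorem pvFoldB (rows : List (List (String × String))) (acc : List (List (String × String))) :
    rows.foldl (fun acc row =>
      let email := pvEmailOf row
      if email = "" ∨ PySem.Str.isIn "@" email = false then acc
      else acc ++ [pvMkOut email row]) acc = acc ++ pvCands rows := by
  induction rows generalizing acc with
  | nil => simp [pvCands]
  | cons row rs ih =>
    simp only [List.foldl_cons, pvCands]
    split
    · exact ih acc
    · rw [ih]; simp

-- A's fold = first-occurrence dedup of the candidate stream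
theorem pvFoldA (rows : List (List (String × String))) (cleaned : List (List (String × String)))
    (seen : PySem.Set String) :
    (rows.foldl
      (fun (st : List (List (String × String)) × PySem.Set String) row =>
        let email := pvEmailOf row
        if email = "" ∨ PySem.Str.isIn "@" email = false then st
        else if st.2.contains email then st
        else (st.1 ++ [pvMkOut email row], st.2.add email))
      (cleaned, seen)).1 = cleaned ++ pvDedupF seen (pvCands rows) := by
  induction rows generalizing cleaned seen with
  | nil => simp [pvCands, pvDedupF]
  | cons row rs ih =>
    simp only [List.foldl_cons, pvCands]
    split
    · exact ih cleaned seen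
    · simp only [pvDedupF, pvKey_mkOut]
      by_cases h : seen.contains (pvEmailOf row)
      · simp only [h, if_pos]
        exact ih cleaned seen
      · simp only [h, Bool.false_eq_true, if_false]
        rw [ih]; simp

theorem pvDedupF_concat (cs : List (List (String × String))) (seen : PySem.Set String)
    (x : List (String × String)) :
    pvDedupF seen (cs ++ [x]) =
      pvDedupF seen cs ++ (if pvKey x ∈ seen ∨ pvKey x ∈ cs.map pvKey then [] else [x]) := by
  induction cs generalizing seen with
  | nil =>
    by_cases h : pvKey x ∈ (seen : List String) <;>
      simp [pvDedupF, PySem.Set.contains, h]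
  | cons c cs ih =>
    simp only [List.cons_append, pvDedupF]
    by_cases hc : seen.contains (pvKey c)
    · have hcm : pvKey c ∈ (seen : List String) := by
        simpa [PySem.Set.contains, List.elem_iff] using hc
      simp only [hc, if_true]
      rw [ih]
      congr 1
      have : (pvKey x ∈ (seen : List String) ∨ pvKey x ∈ (c :: cs).map pvKey) ↔
          (pvKey x ∈ (seen : List String) ∨ pvKey x ∈ cs.map pvKey) := by
        simp only [List.map_cons, List.mem_cons]
        constructor
        · rintro (h | h | h)
          · exact Or.inl h
          · exact Or.inl (h ▸ hcm)
          · exact Or.inr h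
        · rintro (h | h)
          · exact Or.inl h
          · exact Or.inr (Or.inr h)
      exact (if_congr this rfl rfl).symm
    · simp only [hc, Bool.false_eq_true, if_false]
      rw [ih]
      have : (pvKey x ∈ (seen.add (pvKey c) : List String) ∨ pvKey x ∈ cs.map pvKey) ↔
          (pvKey x ∈ (seen : List String) ∨ pvKey x ∈ (c :: cs).map pvKey) := by
        rw [PySem.Set.mem_add]
        simp only [List.map_cons, List.mem_cons]
        tauto
      rw [if_congr this rfl rfl]
      simp

-- B's adjacency fold = pvAdjRec
theorem pvFoldAdj (cs : List (List (String × String))) (acc : List (List (String × String)))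
    (p : List (String × String)) :
    cs.foldl (fun res c =>
      match res.getLast? with
      | none => res ++ [c]
      | some p => if pvKey p ≠ pvKey c then res ++ [c] else res) (acc ++ [p])
    = (acc ++ [p]) ++ pvAdjRun (pvKey p) cs := by
  induction cs generalizing acc p with
  | nil => simp [pvAdjRun]
  | cons c cs ih =>
    simp only [List.foldl_cons, List.getLast?_concat, pvAdjRun]
    by_cases h : pvKey c = pvKey p
    · simp only [h, ne_eq, not_true_eq_false, if_false]
      exact ih acc p
    · have h' : pvKey p ≠ pvKey c := fun e => h e.symm
      simp only [if_neg h, ne_eq, h', not_false_eq_true, if_true]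
      rw [ih (acc ++ [p]) c]
      simp

theorem pvFoldAdj_nil (cs : List (List (String × String))) :
    cs.foldl (fun res c =>
      match res.getLast? with
      | none => res ++ [c]
      | some p => if pvKey p ≠ pvKey c then res ++ [c] else res) []
    = pvAdjRec cs := by
  cases cs with
  | nil => rfl
  | cons c cs =>
    simp only [List.foldl_cons, List.getLast?_nil]
    have := pvFoldAdj cs [] c
    simpa [pvAdjRec] using this

-- stability helpers: how insertBy interacts with adjacency dedup
theorem pvH1 (x : List (String × String)) (ys : List (List (String × String))) (k : String)
    (hk : k < pvKey x) (hx : pvKey x ∉ ys.map pvKey) :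
    pvAdjRun k (PySem.List.insertBy pvBlt x ys) = PySem.List.insertBy pvBlt x (pvAdjRun k ys) := by
  induction ys generalizing k with
  | nil =>
    have hxk : pvKey x ≠ k := ne_of_gt hk
    simp [PySem.List.insertBy, pvAdjRun, hxk]
  | cons z zs ih =>
    simp only [List.map_cons, List.mem_cons, not_or] at hx
    obtain ⟨hxz, hxzs⟩ := hx
    by_cases hbz : pvKey x < pvKey z
    · have hbx : pvBlt x z = true := by simp only [pvBlt, decide_eq_true_eq]; exact hbz
      have hxk : pvKey x ≠ k := ne_of_gt hk
      have hzx : pvKey z ≠ pvKey x := ne_of_gt hbz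
      have hzk : pvKey z ≠ k := ne_of_gt (lt_trans hk hbz)
      simp [PySem.List.insertBy, pvAdjRun, hbx, hxk, hzx, hzk]
    · have hbx : pvBlt x z = false := by simp only [pvBlt, decide_eq_false_iff_not]; exact hbz
      simp only [PySem.List.insertBy, hbx, Bool.false_eq_true, if_false]
      by_cases hzk : pvKey z = k
      · simp only [pvAdjRun, hzk, if_true]
        exact ih k hk hxzs
      · have hzlt : pvKey z < pvKey x :=
          lt_of_le_of_ne (le_of_not_gt hbz) (fun e => hxz e.symm)
        simp only [pvAdjRun, hzk]
        rw [ih (pvKey z) hzlt hxzs]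
        simp [PySem.List.insertBy, hbx]

theorem pvLemI (x : List (String × String)) (s : List (List (String × String)))
    (hx : pvKey x ∉ s.map pvKey) :
    pvAdjRec (PySem.List.insertBy pvBlt x s) = PySem.List.insertBy pvBlt x (pvAdjRec s) := by
  cases s with
  | nil => simp [PySem.List.insertBy, pvAdjRec, pvAdjRun]
  | cons y ys =>
    simp only [List.map_cons, List.mem_cons, not_or] at hx
    obtain ⟨hxy, hxys⟩ := hx
    by_cases hby : pvKey x < pvKey y
    · have hbx : pvBlt x y = true := by simp only [pvBlt, decide_eq_true_eq]; exact hby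
      have hyx : pvKey y ≠ pvKey x := ne_of_gt hby
      simp [PySem.List.insertBy, pvAdjRec, pvAdjRun, hbx, hyx]
    · have hbx : pvBlt x y = false := by simp only [pvBlt, decide_eq_false_iff_not]; exact hby
      have hylt : pvKey y < pvKey x :=
        lt_of_le_of_ne (le_of_not_gt hby) (fun e => hxy e.symm)
      simp only [PySem.List.insertBy, hbx, Bool.false_eq_true, if_false, pvAdjRec]
      rw [pvH1 x ys (pvKey y) hylt hxys]

theorem pvH2 (x : List (String × String)) (ys : List (List (String × String))) (k : String)
    (hk : pvKey x = k) (hy : ∀ z ∈ ys, k ≤ pvKey z) :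
    pvAdjRun k (PySem.List.insertBy pvBlt x ys) = pvAdjRun k ys := by
  induction ys with
  | nil => simp [PySem.List.insertBy, pvAdjRun, hk]
  | cons z zs ih =>
    by_cases hbz : pvKey x < pvKey z
    · have hbx : pvBlt x z = true := by simp only [pvBlt, decide_eq_true_eq]; exact hbz
      simp [PySem.List.insertBy, pvAdjRun, hbx, hk]
    · have hbx : pvBlt x z = false := by simp only [pvBlt, decide_eq_false_iff_not]; exact hbz
      have hzk : pvKey z = k :=
        le_antisymm (hk ▸ le_of_not_gt hbz) (hy z (List.mem_cons_self))
      simp only [PySem.List.insertBy, hbx, Bool.false_eq_true, if_false, pvAdjRun, hzk, if_true]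
      exact ih (fun w hw => hy w (List.mem_cons_of_mem z hw))

theorem pvH3 (x : List (String × String)) (ys : List (List (String × String))) (k : String)
    (hp : ys.Pairwise (fun a b => pvKey a ≤ pvKey b)) (hx : pvKey x ∈ ys.map pvKey) :
    pvAdjRun k (PySem.List.insertBy pvBlt x ys) = pvAdjRun k ys := by
  induction ys generalizing k with
  | nil => simp at hx
  | cons z zs ih =>
    rw [List.pairwise_cons] at hp
    obtain ⟨hz, hp'⟩ := hp
    simp only [List.map_cons, List.mem_cons] at hx
    by_cases hbz : pvKey x < pvKey z
    · exfalso
      rcases hx with h | h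
      · exact absurd h (ne_of_lt hbz)
      · obtain ⟨w, hw, hwk⟩ := List.mem_map.mp h
        exact absurd (hwk ▸ hz w hw) (not_le_of_gt (hwk ▸ hbz))
    · have hbx : pvBlt x z = false := by simp only [pvBlt, decide_eq_false_iff_not]; exact hbz
      simp only [PySem.List.insertBy, hbx, Bool.false_eq_true, if_false]
      by_cases hxz : pvKey x = pvKey z
      · by_cases hzk : pvKey z = k
        · simp only [pvAdjRun, hzk, if_true]
          exact pvH2 x zs k (hxz.trans hzk) (fun w hw => hzk ▸ hz w hw)
        · simp only [pvAdjRun, if_neg hzk]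
          rw [pvH2 x zs (pvKey z) hxz hz]
      · have hx' : pvKey x ∈ zs.map pvKey := by
          rcases hx with h | h
          · exact absurd h hxz
          · exact h
        by_cases hzk : pvKey z = k
        · simp only [pvAdjRun, hzk, if_true]
          exact ih k hp' hx'
        · simp only [pvAdjRun, if_neg hzk]
          rw [ih (pvKey z) hp' hx']

theorem pvLemII (x : List (String × String)) (s : List (List (String × String)))
    (hp : s.Pairwise (fun a b => pvKey a ≤ pvKey b)) (hx : pvKey x ∈ s.map pvKey) :
    pvAdjRec (PySem.List.insertBy pvBlt x s) = pvAdjRec s := by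
  cases s with
  | nil => simp at hx
  | cons y ys =>
    rw [List.pairwise_cons] at hp
    obtain ⟨hy, hp'⟩ := hp
    simp only [List.map_cons, List.mem_cons] at hx
    by_cases hby : pvKey x < pvKey y
    · exfalso
      rcases hx with h | h
      · exact absurd h (ne_of_lt hby)
      · obtain ⟨w, hw, hwk⟩ := List.mem_map.mp h
        exact absurd (hwk ▸ hy w hw) (not_le_of_gt (hwk ▸ hby))
    · have hbx : pvBlt x y = false := by simp only [pvBlt, decide_eq_false_iff_not]; exact hby
      simp only [PySem.List.insertBy, hbx, Bool.false_eq_true, if_false, pvAdjRec]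
      by_cases hxy : pvKey x = pvKey y
      · rw [pvH2 x ys (pvKey y) hxy hy]
      · have hx' : pvKey x ∈ ys.map pvKey := by
          rcases hx with h | h
          · exact absurd h hxy
          · exact h
        rw [pvH3 x ys (pvKey y) hp' hx']

-- main: adjacency dedup after a stable sort = stable sort after first-occurrence dedup
theorem pvMain (cs : List (List (String × String))) :
    pvAdjRec (PySem.List.sorted cs pvKey false) =
      PySem.List.sorted (pvDedupF (PySem.Set.ofList []) cs) pvKey false := by
  induction cs using List.reverseRecOn with
  | nil => simp [PySem.List.sorted_eq_foldl_insertBy, pvDedupF, pvAdjRec]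
  | append_singleton cs x ih =>
    rw [pvDedupF_concat]
    have hsort : ∀ l : List (List (String × String)),
        PySem.List.sorted (l ++ [x]) pvKey false =
          PySem.List.insertBy pvBlt x (PySem.List.sorted l pvKey false) := by
      intro l
      rw [PySem.List.sorted_eq_foldl_insertBy, PySem.List.sorted_eq_foldl_insertBy,
        List.foldl_append]
      rfl
    rw [hsort cs]
    by_cases hmem : pvKey x ∈ cs.map pvKey
    · have hmem' : pvKey x ∈ (PySem.List.sorted cs pvKey false).map pvKey := by
        rw [List.mem_map] at hmem ⊢
        obtain ⟨w, hw, hwk⟩ := hmem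
        exact ⟨w, (PySem.List.mem_sorted _ _ _ _).mpr hw, hwk⟩
      rw [pvLemII x _ (PySem.List.sorted_pairwise cs pvKey) hmem', ih]
      have : (pvKey x ∈ (PySem.Set.ofList [] : List String) ∨ pvKey x ∈ cs.map pvKey) := by
        right; exact hmem
      rw [if_pos this]
      simp
    · have hmem' : pvKey x ∉ (PySem.List.sorted cs pvKey false).map pvKey := by
        intro h
        rw [List.mem_map] at h hmem
        obtain ⟨w, hw, hwk⟩ := h
        exact hmem ⟨w, (PySem.List.mem_sorted _ _ _ _).mp hw, hwk⟩
      rw [pvLemI x _ hmem', ih]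
      have : ¬ (pvKey x ∈ (PySem.Set.ofList [] : List String) ∨ pvKey x ∈ cs.map pvKey) := by
        rintro (h | h)
        · simp [PySem.Set.ofList, PySem.Set.empty] at h
        · exact hmem h
      rw [if_neg this, hsort]

-- ===== VERDICT (by name: the statement is the Claim_ definition above) =====
theorem clean_permission_rows_py_spec : Claim_equal_clean_permission_rows_py := by
  intro rows _
  unfold Spec_clean_permission_rows_py clean_permission_rows_py clean_permission_rows_py_alt
  rw [pvFoldA rows [] (PySem.Set.ofList []), pvFoldB rows [], List.nil_append, List.nil_append,
    pvFoldAdj_nil, pvMain]
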